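-- pv_equiv track=rewrite | github.com/wb844/zoom-csv-convert | main.py | license_parse
-- ===== SOURCE A (Python) =====
-- def license_parse(input_license):
--     return_license = {}
--
--     if "Licensed" in input_license:
--         return_license["User Type"] = "Licensed"
--     elif "On-Prem" in input_license:
--         return_license["User Type"] = "On-Prem"
--     else:
--         return_license["User Type"] = "Basic"
--
--     license_string = input_license[input_license.find("(")+1:input_license.find(")")]
--     if license_string:
--         license_list = license_string.split("|")
--         webinar_license = [i for i in license_list if "Zoom Webinars" in i]
--         events_license = [i for i in license_list if "Zoom Events" in i]
--         whiteboard_license = [i for i in license_list if "Zoom Whiteboard" in i]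
--         large_license = [i for i in license_list if "Large" in i]
--         cmk_license = [i for i in license_list if "Zoom Customer Manged Key" in i]
--
--         if webinar_license:
--             return_license["Zoom Webinars"] = webinar_license[0]
--         if events_license:
--             return_license["Zoom Events"] = events_license[0]
--         if whiteboard_license:
--             return_license["Zoom Whiteboard"] = whiteboard_license[0]
--         if large_license:
--             return_license["Large Meeting"] = large_license[0]
--         if cmk_license:
--             return_license["Zoom Customer Managed Key"] = cmk_license[0]
--
--     return return_license
-- ===== SOURCE B (Python) =====
-- PAIRS = [
--     ("Zoom Webinars", "Zoom Webinars"),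
--     ("Zoom Events", "Zoom Events"),
--     ("Zoom Whiteboard", "Zoom Whiteboard"),
--     ("Large", "Large Meeting"),
--     ("Zoom Customer Manged Key", "Zoom Customer Managed Key"),
-- ]
--
-- def license_parse(input_license):
--     if "Licensed" in input_license:
--         user = "Licensed"
--     elif "On-Prem" in input_license:
--         user = "On-Prem"
--     else:
--         user = "Basic"
--     result = {"User Type": user}
--
--     license_string = input_license[input_license.find("(")+1:input_license.find(")")]
--     if license_string:
--         found = {}
--         for tok in license_string.split("|"):
--             for sub, key in PAIRS:
--                 if sub in tok and key not in found:
--                     found[key] = tok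
--         for _, key in PAIRS:
--             if key in found:
--                 result[key] = found[key]
--     return result
-- ===== Notes on version B (the rewrite author's own statement) =====
-- stated objective: simpler
-- what changed: Replaces the five separate filter-then-[0] scans of the token list with one data-driven pass over the tokens that records the first matching token per category in a dict keyed by a (substring, output_key) table, then emits the categories in table order.
import Mathlib
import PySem

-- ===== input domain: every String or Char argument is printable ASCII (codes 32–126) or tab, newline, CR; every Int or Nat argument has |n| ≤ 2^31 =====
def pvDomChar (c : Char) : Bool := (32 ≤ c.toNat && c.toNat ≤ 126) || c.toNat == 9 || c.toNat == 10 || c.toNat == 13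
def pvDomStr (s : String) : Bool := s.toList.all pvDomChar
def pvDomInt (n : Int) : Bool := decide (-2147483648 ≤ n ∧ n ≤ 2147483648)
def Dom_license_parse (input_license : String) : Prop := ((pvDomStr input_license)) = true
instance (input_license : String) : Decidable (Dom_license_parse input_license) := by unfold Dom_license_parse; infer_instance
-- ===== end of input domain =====

-- B replaces A's five filter-then-head scans by one data-driven pass over the tokens (simpler).

-- ===== PORT A =====
def license_parse (input_license : String) : List (String × String) :=
  let return_license : PySem.Dict String String := PySem.Dict.empty
  let return_license :=
    if PySem.Str.isIn "Licensed" input_license then return_license.insert "User Type" "Licensed"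
    else if PySem.Str.isIn "On-Prem" input_license then return_license.insert "User Type" "On-Prem"
    else return_license.insert "User Type" "Basic"
  let license_string := PySem.Str.slice input_license
      (some (PySem.Str.find input_license "(" + 1)) (some (PySem.Str.find input_license ")"))
  if license_string ≠ "" then
    -- sep "|" is nonempty, so split? is always `some`; getD [] is a faithful rendering
    let license_list := (PySem.Str.split? license_string "|").getD []
    let webinar_license := license_list.filter (fun i => PySem.Str.isIn "Zoom Webinars" i)
    let events_license := license_list.filter (fun i => PySem.Str.isIn "Zoom Events" i)
    let whiteboard_license := license_list.filter (fun i => PySem.Str.isIn "Zoom Whiteboard" i)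
    let large_license := license_list.filter (fun i => PySem.Str.isIn "Large" i)
    let cmk_license := license_list.filter (fun i => PySem.Str.isIn "Zoom Customer Manged Key" i)
    let d := return_license
    let d := match webinar_license with | [] => d | x :: _ => d.insert "Zoom Webinars" x
    let d := match events_license with | [] => d | x :: _ => d.insert "Zoom Events" x
    let d := match whiteboard_license with | [] => d | x :: _ => d.insert "Zoom Whiteboard" x
    let d := match large_license with | [] => d | x :: _ => d.insert "Large Meeting" x
    let d := match cmk_license with | [] => d | x :: _ => d.insert "Zoom Customer Managed Key" x
    d.items
  else return_license.items

-- ===== PORT B =====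
-- the (membership substring, output key) table of Source B
def pvPairs : List (String × String) :=
  [("Zoom Webinars", "Zoom Webinars"),
   ("Zoom Events", "Zoom Events"),
   ("Zoom Whiteboard", "Zoom Whiteboard"),
   ("Large", "Large Meeting"),
   ("Zoom Customer Manged Key", "Zoom Customer Managed Key")]

-- the body of B's `for tok` loop: one token tested against every table row
def pvStep (f : PySem.Dict String String) (tok : String) : PySem.Dict String String :=
  pvPairs.foldl (fun f p =>
    if PySem.Str.isIn p.1 tok && !(f.contains p.2) then f.insert p.2 tok else f) f

def license_parse_alt (input_license : String) : List (String × String) :=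
  let user :=
    if PySem.Str.isIn "Licensed" input_license then "Licensed"
    else if PySem.Str.isIn "On-Prem" input_license then "On-Prem"
    else "Basic"
  let result : PySem.Dict String String := PySem.Dict.empty.insert "User Type" user
  let license_string := PySem.Str.slice input_license
      (some (PySem.Str.find input_license "(" + 1)) (some (PySem.Str.find input_license ")"))
  if license_string ≠ "" then
    -- sep "|" is nonempty, so split? is always `some`; getD [] is a faithful rendering
    let toks := (PySem.Str.split? license_string "|").getD []
    let found := toks.foldl pvStep PySem.Dict.empty
    (pvPairs.foldl (fun r p =>
      match found.get? p.2 with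
      | some v => r.insert p.2 v
      | none => r) result).items
  else result.items

-- ===== PRECONDITION & SPEC =====
def Spec_license_parse (input_license : String) (out : List (String × String)) : Prop := out = license_parse_alt input_license
instance (input_license : String) (out : List (String × String)) : Decidable (Spec_license_parse input_license out) := by unfold Spec_license_parse; infer_instance

-- ===== CLAIM (what is proved, stated in full; the proofs are below) =====
def Claim_equal_license_parse : Prop := ∀ (input_license : String), Dom_license_parse input_license → Spec_license_parse input_license (license_parse input_license)

-- ===== LEMMAS AND PROOFS =====

-- a conditional insert at another key changes neither get? nor contains at K
theorem pv_ci_get_ne (S' K' tok : String) (f : PySem.Dict String String) (K : String) (h : K ≠ K') :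
    (if PySem.Str.isIn S' tok && !(f.contains K') then f.insert K' tok else f).get? K = f.get? K := by
  split_ifs with _
  · exact PySem.Dict.get?_insert_of_ne f tok h
  · rfl

theorem pv_ci_contains_ne (S' K' tok : String) (f : PySem.Dict String String) (K : String) (h : K ≠ K') :
    (if PySem.Str.isIn S' tok && !(f.contains K') then f.insert K' tok else f).contains K = f.contains K := by
  split_ifs with _
  · simp [PySem.Dict.contains_insert, h]
  · rfl

-- a conditional insert observed at its own key
theorem pv_ci_get_self (S K tok : String) (f : PySem.Dict String String) :
    (if PySem.Str.isIn S tok && !(f.contains K) then f.insert K tok else f).get? K =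
      if PySem.Str.isIn S tok && !(f.contains K) then some tok else f.get? K := by
  split_ifs with _
  · exact PySem.Dict.get?_insert_self f K tok
  · rfl

-- one pvStep, observed at one of the five table keys K with substring S
theorem pv_get_step (S K : String) (hSK : (S, K) ∈ pvPairs)
    (f : PySem.Dict String String) (tok : String) :
    (pvStep f tok).get? K =
      if PySem.Str.isIn S tok && !(f.contains K) then some tok else f.get? K := by
  fin_cases hSK <;> simp only [pvStep, pvPairs, List.foldl]
  · rw [pv_ci_get_ne _ _ _ _ _ (by decide), pv_ci_get_ne _ _ _ _ _ (by decide),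
      pv_ci_get_ne _ _ _ _ _ (by decide), pv_ci_get_ne _ _ _ _ _ (by decide), pv_ci_get_self]
  · rw [pv_ci_get_ne _ _ _ _ _ (by decide), pv_ci_get_ne _ _ _ _ _ (by decide),
      pv_ci_get_ne _ _ _ _ _ (by decide), pv_ci_get_self,
      pv_ci_contains_ne _ _ _ _ _ (by decide), pv_ci_get_ne _ _ _ _ _ (by decide)]
  · rw [pv_ci_get_ne _ _ _ _ _ (by decide), pv_ci_get_ne _ _ _ _ _ (by decide), pv_ci_get_self,
      pv_ci_contains_ne _ _ _ _ _ (by decide), pv_ci_contains_ne _ _ _ _ _ (by decide),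
      pv_ci_get_ne _ _ _ _ _ (by decide), pv_ci_get_ne _ _ _ _ _ (by decide)]
  · rw [pv_ci_get_ne _ _ _ _ _ (by decide), pv_ci_get_self,
      pv_ci_contains_ne _ _ _ _ _ (by decide), pv_ci_contains_ne _ _ _ _ _ (by decide),
      pv_ci_contains_ne _ _ _ _ _ (by decide), pv_ci_get_ne _ _ _ _ _ (by decide),
      pv_ci_get_ne _ _ _ _ _ (by decide), pv_ci_get_ne _ _ _ _ _ (by decide)]
  · rw [pv_ci_get_self,
      pv_ci_contains_ne _ _ _ _ _ (by decide), pv_ci_contains_ne _ _ _ _ _ (by decide),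
      pv_ci_contains_ne _ _ _ _ _ (by decide), pv_ci_contains_ne _ _ _ _ _ (by decide),
      pv_ci_get_ne _ _ _ _ _ (by decide), pv_ci_get_ne _ _ _ _ _ (by decide),
      pv_ci_get_ne _ _ _ _ _ (by decide), pv_ci_get_ne _ _ _ _ _ (by decide)]

-- the whole token loop, observed at key K: the first matching token wins
theorem pv_get_fold (S K : String) (hSK : (S, K) ∈ pvPairs)
    (toks : List String) (f : PySem.Dict String String) :
    (toks.foldl pvStep f).get? K =
      (f.get? K).or ((toks.filter (fun i => PySem.Str.isIn S i)).head?) := by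
  induction toks generalizing f with
  | nil => simp
  | cons t ts ih =>
    rw [List.foldl_cons, ih, pv_get_step S K hSK]
    by_cases hc : f.contains K = true
    · have hs : (f.get? K).isSome := by rw [← PySem.Dict.contains_eq_isSome_get?]; exact hc
      obtain ⟨v, hv⟩ := Option.isSome_iff_exists.mp hs
      simp [hc, hv]
    · have hn : f.get? K = none :=
        (PySem.Dict.get?_eq_none_iff_contains f K).mpr (by simpa using hc)
      simp [hn, List.filter_cons]
      split <;> simp_all

theorem pv_found_get (S K : String) (hSK : (S, K) ∈ pvPairs) (toks : List String) :
    (toks.foldl pvStep PySem.Dict.empty).get? K =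
      (toks.filter (fun i => PySem.Str.isIn S i)).head? := by
  rw [pv_get_fold S K hSK]
  simp [PySem.Dict.get?_empty]

-- B's two table-driven folds equal A's five filter-then-head updates, from any base dict
theorem pv_body (d : PySem.Dict String String) (toks : List String) :
    (pvPairs.foldl (fun r p =>
        match (toks.foldl pvStep PySem.Dict.empty).get? p.2 with
        | some v => r.insert p.2 v
        | none => r) d) =
      (let d := match toks.filter (fun i => PySem.Str.isIn "Zoom Webinars" i) with
        | [] => d | x :: _ => d.insert "Zoom Webinars" x
       let d := match toks.filter (fun i => PySem.Str.isIn "Zoom Events" i) with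
        | [] => d | x :: _ => d.insert "Zoom Events" x
       let d := match toks.filter (fun i => PySem.Str.isIn "Zoom Whiteboard" i) with
        | [] => d | x :: _ => d.insert "Zoom Whiteboard" x
       let d := match toks.filter (fun i => PySem.Str.isIn "Large" i) with
        | [] => d | x :: _ => d.insert "Large Meeting" x
       match toks.filter (fun i => PySem.Str.isIn "Zoom Customer Manged Key" i) with
        | [] => d | x :: _ => d.insert "Zoom Customer Managed Key" x) := by
  have h1 := pv_found_get "Zoom Webinars" "Zoom Webinars" (by simp [pvPairs]) toks
  have h2 := pv_found_get "Zoom Events" "Zoom Events" (by simp [pvPairs]) toks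
  have h3 := pv_found_get "Zoom Whiteboard" "Zoom Whiteboard" (by simp [pvPairs]) toks
  have h4 := pv_found_get "Large" "Large Meeting" (by simp [pvPairs]) toks
  have h5 := pv_found_get "Zoom Customer Manged Key" "Zoom Customer Managed Key" (by simp [pvPairs]) toks
  simp only [pvPairs, List.foldl]
  rw [h1, h2, h3, h4, h5]
  cases (toks.filter (fun i => PySem.Str.isIn "Zoom Webinars" i)) <;>
  cases (toks.filter (fun i => PySem.Str.isIn "Zoom Events" i)) <;>
  cases (toks.filter (fun i => PySem.Str.isIn "Zoom Whiteboard" i)) <;>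
  cases (toks.filter (fun i => PySem.Str.isIn "Large" i)) <;>
  cases (toks.filter (fun i => PySem.Str.isIn "Zoom Customer Manged Key" i)) <;>
  rfl

-- ===== VERDICT (by name: the statement is the Claim_ definition above) =====
theorem license_parse_spec : Claim_equal_license_parse := by
  intro s _
  show license_parse s = license_parse_alt s
  simp only [license_parse, license_parse_alt]
  by_cases hl : PySem.Str.isIn "Licensed" s = true <;>
  by_cases ho : PySem.Str.isIn "On-Prem" s = true <;>
  by_cases hne : PySem.Str.slice s (some (PySem.Str.find s "(" + 1))
      (some (PySem.Str.find s ")")) ≠ "" <;>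
  simp only [hl, ho, hne, if_true, if_false, Bool.false_eq_true, not_false_eq_true,
    not_not, ite_not, ne_eq, pv_body]
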